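-- pv_equiv track=rewrite | github.com/PlebOne/nostr-home | nostr_relay_enhanced.py | event_matches_generic_tags
-- ===== SOURCE A (Python) =====
-- from typing import Dict, List, Optional, Set, Tuple, Union
--
-- def event_matches_generic_tags(event: Dict, filter_obj: Dict) -> bool:
--     """NIP-12: Generic tag queries"""
--     for key, values in filter_obj.items():
--         if key.startswith('#') and len(key) == 2:
--             tag_name = key[1]
--             if not isinstance(values, list):
--                 values = [values]
--
--             # Check if event has any of the required tag values
--             found = False
--             for tag in event.get('tags', []):
--                 if len(tag) >= 2 and tag[0] == tag_name and tag[1] in values: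
--                     found = True
--                     break
--
--             if not found:
--                 return False
--
--     return True
-- ===== SOURCE B (Python) =====
-- def event_matches_generic_tags(event, filter_obj):
--     """NIP-12: Generic tag queries — requirement table + single pass over event tags."""
--     # Build the list of pending requirements: (tag name, accepted value set)
--     reqs = []
--     for key, values in filter_obj.items():
--         if key.startswith('#') and len(key) == 2:
--             if not isinstance(values, list):
--                 values = [values]
--             reqs.append((key[1], set(values)))
--     satisfied = [False] * len(reqs)
--     # One pass over the event's tags, marking every requirement a tag satisfies
--     for tag in event.get('tags', []):
--         if len(tag) >= 2:
--             for i, (name, allowed) in enumerate(reqs):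
--                 if not satisfied[i] and tag[0] == name and tag[1] in allowed:
--                     satisfied[i] = True
--     return all(satisfied)
-- ===== Notes on version B (the rewrite author's own statement) =====
-- stated objective: alternative
-- what changed: Instead of A's per-filter-key loop that rescans the event's tag list for each '#x' filter (with early return), B first builds a requirement table mapping each two-char '#' filter key to its accepted value set, then makes a single pass over the event's tags marking every requirement a tag satisfies, and returns whether all requirements were marked.
import Mathlib
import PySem

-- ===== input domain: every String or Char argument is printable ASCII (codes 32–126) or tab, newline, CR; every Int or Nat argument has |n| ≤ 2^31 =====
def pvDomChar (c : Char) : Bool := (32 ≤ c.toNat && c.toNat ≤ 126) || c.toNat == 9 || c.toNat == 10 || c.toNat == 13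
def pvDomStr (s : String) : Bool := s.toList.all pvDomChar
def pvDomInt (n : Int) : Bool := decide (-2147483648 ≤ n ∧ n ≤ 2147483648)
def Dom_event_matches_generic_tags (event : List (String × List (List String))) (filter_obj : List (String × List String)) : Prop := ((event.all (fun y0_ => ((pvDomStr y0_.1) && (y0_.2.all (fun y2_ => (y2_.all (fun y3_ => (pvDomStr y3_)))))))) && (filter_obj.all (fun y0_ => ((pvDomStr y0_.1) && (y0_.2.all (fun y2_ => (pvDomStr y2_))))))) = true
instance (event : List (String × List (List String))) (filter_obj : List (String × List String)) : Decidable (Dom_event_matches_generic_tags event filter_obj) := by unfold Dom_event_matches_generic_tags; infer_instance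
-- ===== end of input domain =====

-- B replaces A's per-filter rescans of the event's tags by a requirement table plus a single
-- pass over the event tags (objective: alternative decomposition, same asymptotic cost).

-- ===== PORT A =====
-- inner 'for tag in event.get('tags', [])' loop with break: first tag matching is 'found'
def pvFoundA (tags : List (List String)) (tag_name : String) (values : List String) : Bool :=
  tags.any (fun tag =>
    decide (2 ≤ tag.length) &&
      (((PySem.List.pyGet? tag 0).getD "" == tag_name) &&
        values.contains ((PySem.List.pyGet? tag 1).getD "")))

-- outer 'for key, values in filter_obj.items()' loop with early 'return False'
def pvGoA (tags : List (List String)) : List (String × List String) → Bool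
  | [] => true
  | (key, values) :: rest =>
    if PySem.Str.startswith key "#" && (PySem.Str.len key == 2) then
      let tag_name := ((PySem.Str.pyGet? key 1).map (fun c => String.ofList [c])).getD ""
      let found := pvFoundA tags tag_name values
      if !found then false else pvGoA tags rest
    else pvGoA tags rest

def event_matches_generic_tags (event : List (String × List (List String))) (filter_obj : List (String × List String)) : Bool :=
  pvGoA ((List.lookup "tags" event).getD []) filter_obj

-- ===== PORT B =====
-- one requirement table entry: (tag name, accepted value set)
def pvReqOf (kv : String × List String) : String × PySem.Set String :=
  (((PySem.Str.pyGet? kv.1 1).map (fun c => String.ofList [c])).getD "", PySem.Set.ofList kv.2)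

-- inner 'for i, (name, allowed) in enumerate(reqs)' loop: mark every requirement this tag satisfies
def pvMark (tag : List String) (reqs : List (String × PySem.Set String)) (sat : List Bool) : List Bool :=
  if 2 ≤ tag.length then
    (reqs.zip sat).map (fun p =>
      if !p.2 && (((PySem.List.pyGet? tag 0).getD "" == p.1.1) &&
          PySem.Set.contains p.1.2 ((PySem.List.pyGet? tag 1).getD "")) then true else p.2)
  else sat

def event_matches_generic_tags_alt (event : List (String × List (List String))) (filter_obj : List (String × List String)) : Bool :=
  let reqs := filter_obj.foldl (fun acc kv =>
    if PySem.Str.startswith kv.1 "#" && (PySem.Str.len kv.1 == 2) then acc ++ [pvReqOf kv]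
    else acc) []
  let sat := ((List.lookup "tags" event).getD []).foldl
    (fun s tag => pvMark tag reqs s) (List.replicate reqs.length false)
  sat.all id

-- ===== PRECONDITION & SPEC =====
def Spec_event_matches_generic_tags (event : List (String × List (List String))) (filter_obj : List (String × List String)) (out : Bool) : Prop := out = event_matches_generic_tags_alt event filter_obj
instance (event : List (String × List (List String))) (filter_obj : List (String × List String)) (out : Bool) : Decidable (Spec_event_matches_generic_tags event filter_obj out) := by unfold Spec_event_matches_generic_tags; infer_instance

-- ===== CLAIM (what is proved, stated in full; the proofs are below) =====
def Claim_equal_event_matches_generic_tags : Prop := ∀ (event : List (String × List (List String))) (filter_obj : List (String × List String)), Dom_event_matches_generic_tags event filter_obj → Spec_event_matches_generic_tags event filter_obj (event_matches_generic_tags event filter_obj)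

-- ===== LEMMAS AND PROOFS =====

-- the per-(tag, requirement) test of B, written as a predicate
def pvHit (tag : List String) (r : String × PySem.Set String) : Bool :=
  decide (2 ≤ tag.length) &&
    (((PySem.List.pyGet? tag 0).getD "" == r.1) &&
      PySem.Set.contains r.2 ((PySem.List.pyGet? tag 1).getD ""))

theorem pv_zip_map_zip {R : Type} (g h : R × Bool → Bool) :
    ∀ (reqs : List R) (sat : List Bool),
    (reqs.zip ((reqs.zip sat).map g)).map h = (reqs.zip sat).map (fun p => h (p.1, g p)) := by
  intro reqs
  induction reqs with
  | nil => intro sat; simp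
  | cons r rs ih =>
    intro sat
    cases sat with
    | nil => simp
    | cons b bs => simp [ih]

theorem pv_mark_fold (reqs : List (String × PySem.Set String)) :
    ∀ (tags : List (List String)) (sat : List Bool), sat.length = reqs.length →
    tags.foldl (fun s tag => pvMark tag reqs s) sat
      = (reqs.zip sat).map (fun p => p.2 || tags.any (fun tag => pvHit tag p.1)) := by
  intro tags
  induction tags with
  | nil =>
    intro sat hlen
    simp only [List.foldl_nil, List.any_nil, Bool.or_false]
    exact (List.map_snd_zip (le_of_eq hlen)).symm
  | cons t ts ih =>
    intro sat hlen
    by_cases h2 : 2 ≤ t.length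
    · have hstep : pvMark t reqs sat
          = (reqs.zip sat).map (fun p =>
              if !p.2 && (((PySem.List.pyGet? t 0).getD "" == p.1.1) &&
                  PySem.Set.contains p.1.2 ((PySem.List.pyGet? t 1).getD "")) then true else p.2) := by
        simp [pvMark, h2]
      have hlen' : (pvMark t reqs sat).length = reqs.length := by
        rw [hstep]; simp [List.length_zip, hlen]
      calc (t :: ts).foldl (fun s tag => pvMark tag reqs s) sat
          = ts.foldl (fun s tag => pvMark tag reqs s) (pvMark t reqs sat) := by simp [List.foldl_cons]
        _ = ((reqs.zip (pvMark t reqs sat)).map (fun p => p.2 || ts.any (fun tag => pvHit tag p.1))) := ih _ hlen'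
        _ = (reqs.zip sat).map (fun p => p.2 || (t :: ts).any (fun tag => pvHit tag p.1)) := by
            rw [hstep, pv_zip_map_zip]
            apply List.map_congr_left
            intro p _
            simp only [List.any_cons, pvHit, h2, decide_true, Bool.true_and]
            cases hb : p.2 <;>
              cases hc : (((PySem.List.pyGet? t 0).getD "" == p.1.1) &&
                PySem.Set.contains p.1.2 ((PySem.List.pyGet? t 1).getD "")) <;> simp
    · have hstep : pvMark t reqs sat = sat := by simp [pvMark, h2]
      calc (t :: ts).foldl (fun s tag => pvMark tag reqs s) sat
          = ts.foldl (fun s tag => pvMark tag reqs s) sat := by simp [List.foldl_cons, hstep]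
        _ = (reqs.zip sat).map (fun p => p.2 || ts.any (fun tag => pvHit tag p.1)) := ih _ hlen
        _ = (reqs.zip sat).map (fun p => p.2 || (t :: ts).any (fun tag => pvHit tag p.1)) := by
            apply List.map_congr_left
            intro p _
            simp [List.any_cons, pvHit, h2]

theorem pv_zip_replicate_map {R : Type} (f : R × Bool → Bool) :
    ∀ (reqs : List R),
    (reqs.zip (List.replicate reqs.length false)).map f = reqs.map (fun r => f (r, false)) := by
  intro reqs
  induction reqs with
  | nil => simp
  | cons r rs ih => simp [List.replicate_succ, ih]

theorem pv_reqs_fold (filter_obj : List (String × List String)) :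
    ∀ acc, filter_obj.foldl (fun acc kv =>
      if PySem.Str.startswith kv.1 "#" && (PySem.Str.len kv.1 == 2) then acc ++ [pvReqOf kv]
      else acc) acc
      = acc ++ (filter_obj.filter (fun kv => PySem.Str.startswith kv.1 "#" && (PySem.Str.len kv.1 == 2))).map pvReqOf := by
  induction filter_obj with
  | nil => simp
  | cons kv rest ih =>
    intro acc
    simp only [List.foldl_cons, List.filter_cons]
    by_cases h : (PySem.Str.startswith kv.1 "#" && (PySem.Str.len kv.1 == 2)) = true
    · rw [if_pos h, if_pos h, ih, List.map_cons]
      simp [List.append_assoc]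
    · rw [if_neg h, if_neg h, ih]

theorem pv_set_contains_ofList (values : List String) (x : String) :
    PySem.Set.contains (PySem.Set.ofList values) x = values.contains x := by
  apply Bool.eq_iff_iff.mpr
  simp [PySem.Set.mem_ofList]

theorem pv_found_eq (tags : List (List String)) (kv : String × List String) :
    pvFoundA tags (((PySem.Str.pyGet? kv.1 1).map (fun c => String.ofList [c])).getD "") kv.2
      = tags.any (fun tag => pvHit tag (pvReqOf kv)) := by
  unfold pvFoundA pvHit pvReqOf
  exact List.any_congr rfl fun tag => by rw [pv_set_contains_ofList]

theorem pv_goA_all (tags : List (List String)) :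
    ∀ (l : List (String × List String)),
    pvGoA tags l = l.all (fun kv =>
      !(PySem.Str.startswith kv.1 "#" && (PySem.Str.len kv.1 == 2)) ||
        pvFoundA tags (((PySem.Str.pyGet? kv.1 1).map (fun c => String.ofList [c])).getD "") kv.2) := by
  intro l
  induction l with
  | nil => simp [pvGoA]
  | cons kv rest ih =>
    obtain ⟨key, values⟩ := kv
    simp only [pvGoA, List.all_cons]
    by_cases h : (PySem.Str.startswith key "#" && (PySem.Str.len key == 2)) = true
    · rw [if_pos h, h]
      cases hf : pvFoundA tags (((PySem.Str.pyGet? key 1).map (fun c => String.ofList [c])).getD "") values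
      · simp
      · simp [ih]
    · rw [if_neg h]
      rw [Bool.not_eq_true] at h
      rw [h]
      simp only [Bool.not_false, Bool.true_or, Bool.true_and]
      exact ih

-- ===== VERDICT (by name: the statement is the Claim_ definition above) =====
theorem event_matches_generic_tags_spec : Claim_equal_event_matches_generic_tags := by
  intro event filter_obj _
  show event_matches_generic_tags event filter_obj = event_matches_generic_tags_alt event filter_obj
  simp only [event_matches_generic_tags, event_matches_generic_tags_alt]
  rw [pv_mark_fold _ _ _ (by simp), pv_zip_replicate_map, pv_goA_all, pv_reqs_fold]
  rw [List.nil_append, List.all_map, List.all_map, List.all_filter]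
  exact List.all_congr rfl fun kv => by
    simp only [Function.comp, id_eq]
    rw [Bool.false_or, pv_found_eq]
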